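-- pv_equiv track=rewrite | github.com/cry999/AtCoder | beginner-contest/052/B.py | increment_decrement
-- ===== SOURCE A (Python) =====
-- def increment_decrement(N: int, S: str)->int:
--     x, max_x = 0, 0
--     for c in S:
--         if c == 'I':
--             x += 1
--             max_x = max(max_x, x)
--         else:
--             x -= 1
--     return max_x
-- ===== SOURCE B (Python) =====
-- def increment_decrement(N: int, S: str) -> int:
--     # Right-to-left clamped recurrence: the best prefix height of c+rest is
--     # max(0, delta(c) + best prefix height of rest); scan S backwards, no
--     # running counter and no running maximum of a forward sum is kept.
--     m = 0
--     for c in reversed(S):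
--         m = max(0, (1 if c == 'I' else -1) + m)
--     return m
-- ===== Notes on version B (the rewrite author's own statement) =====
-- stated objective: alternative
-- what changed: A scans forward keeping a running counter x and a running maximum updated on 'I' steps; B scans the string right-to-left with the clamped recurrence m = max(0, delta(c) + m), computing the max prefix height without ever maintaining a forward prefix sum or a separate max.
import Mathlib
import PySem

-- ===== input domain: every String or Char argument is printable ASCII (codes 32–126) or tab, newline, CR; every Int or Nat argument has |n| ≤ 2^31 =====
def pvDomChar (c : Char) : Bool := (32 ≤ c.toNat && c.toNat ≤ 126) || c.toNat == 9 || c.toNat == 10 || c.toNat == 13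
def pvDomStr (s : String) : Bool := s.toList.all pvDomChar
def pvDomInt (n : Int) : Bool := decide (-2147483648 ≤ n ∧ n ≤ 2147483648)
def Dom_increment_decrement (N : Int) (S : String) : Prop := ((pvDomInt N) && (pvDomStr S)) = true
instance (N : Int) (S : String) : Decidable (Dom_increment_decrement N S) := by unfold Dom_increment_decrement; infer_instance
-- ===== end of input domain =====

-- B replaces A's forward running-counter-and-max loop by a right-to-left scan with the
-- clamped recurrence m = max(0, delta(c) + m) (alternative algorithm, same cost).


-- ===== PORT A =====
-- loop body: x, max_x updated per character (max taken only on the 'I' branch)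
def pvStepA (st : Int × Int) (c : Char) : Int × Int :=
  if c = 'I' then (st.1 + 1, max st.2 (st.1 + 1)) else (st.1 - 1, st.2)

def increment_decrement (N : Int) (S : String) : Int :=
  (S.toList.foldl pvStepA (0, 0)).2

-- ===== PORT B =====
-- right-to-left clamped recurrence: m = max(0, delta(c) + m) over reversed(S)
def pvStepB (m : Int) (c : Char) : Int :=
  max 0 ((if c = 'I' then 1 else -1) + m)

def increment_decrement_alt (N : Int) (S : String) : Int :=
  S.toList.reverse.foldl pvStepB 0

-- ===== PRECONDITION & SPEC =====
def Spec_increment_decrement (N : Int) (S : String) (out : Int) : Prop := out = increment_decrement_alt N S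
instance (N : Int) (S : String) (out : Int) : Decidable (Spec_increment_decrement N S out) := by unfold Spec_increment_decrement; infer_instance

-- ===== CLAIM (what is proved, stated in full; the proofs are below) =====
def Claim_equal_increment_decrement : Prop := ∀ (N : Int) (S : String), Dom_increment_decrement N S → Spec_increment_decrement N S (increment_decrement N S)

-- ===== LEMMAS AND PROOFS =====

-- ===== VERDICT (by name: the statement is the Claim_ definition above) =====
-- B's reverse-foldl is a foldr
theorem pvB_foldr (l : List Char) :
    l.reverse.foldl pvStepB 0 = l.foldr (fun c m => pvStepB m c) 0 := by
  simp [List.foldl_reverse]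

theorem pvF_nonneg (l : List Char) : 0 ≤ l.foldr (fun c m => pvStepB m c) 0 := by
  cases l with
  | nil => simp
  | cons c l => exact le_max_left _ _

-- A's fused loop equals "current max m, current height x, plus best future rise"
theorem pvMain (l : List Char) : ∀ (x m : Int), x ≤ m →
    (l.foldl pvStepA (x, m)).2 = max m (x + l.foldr (fun c m => pvStepB m c) 0) := by
  induction l with
  | nil => intro x m h; simp; omega
  | cons c l ih =>
      intro x m h
      have hF := pvF_nonneg l
      by_cases hc : c = 'I'
      · rw [List.foldl_cons, List.foldr_cons]
        have h1 : pvStepA (x, m) c = (x + 1, max m (x + 1)) := by simp [pvStepA, hc]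
        rw [h1, ih (x + 1) (max m (x + 1)) (le_max_right _ _)]
        generalize l.foldr (fun c m => pvStepB m c) 0 = F at hF ⊢
        unfold pvStepB; rw [if_pos hc]; omega
      · rw [List.foldl_cons, List.foldr_cons]
        have h1 : pvStepA (x, m) c = (x - 1, m) := by simp [pvStepA, hc]
        rw [h1, ih (x - 1) m (by omega)]
        generalize l.foldr (fun c m => pvStepB m c) 0 = F at hF ⊢
        unfold pvStepB; rw [if_neg hc]; omega

-- ===== VERDICT (by name: the statement is the Claim_ definition above) =====
theorem increment_decrement_spec : Claim_equal_increment_decrement := by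
  intro N S _
  unfold Spec_increment_decrement increment_decrement increment_decrement_alt
  rw [pvB_foldr, pvMain S.toList 0 0 le_rfl]
  have := pvF_nonneg S.toList
  omega
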